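-- pv_equiv track=rewrite | github.com/wkmp26/connect-x | agent_regular.py | count_consecutive_score
-- ===== SOURCE A (Python) =====
-- def count_consecutive_score(row):
--     max_count_1 = count_1 = 0
--     max_count_2 = count_2 = 0
--
--     scoring = {
--         0: 0,
--         1: 0,
--         2: 10,
--         3: 40,
--     }
--
--     for r in row:
--         if r == 1:
--             count_1 += 1
--             count_2 = 0
--             max_count_1 = max(max_count_1,count_1)
--         elif r == 2:
--             count_2 += 1
--             count_1 = 0
--             max_count_2 = max(max_count_2,count_2)
--         else:
--             count_1 = 0
--             count_2 = 0
--
--     return scoring[max_count_1], -scoring[max_count_2]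
-- ===== SOURCE B (Python) =====
-- def count_consecutive_score(row):
--     scoring = {
--         0: 0,
--         1: 0,
--         2: 10,
--         3: 40,
--     }
--     max1 = max2 = 0
--     i, n = 0, len(row)
--     while i < n:
--         j = i
--         while j < n and row[j] == row[i]:
--             j += 1
--         if row[i] == 1:
--             max1 = max(max1, j - i)
--         elif row[i] == 2:
--             max2 = max(max2, j - i)
--         i = j
--     return scoring[max1], -scoring[max2]
-- ===== Notes on version B (the rewrite author's own statement) =====
-- stated objective: alternative
-- what changed: B scans the row by maximal runs with a two-pointer sweep and keeps only the two run-length maxima, instead of A's per-element running counters reset on every mismatch.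
import Mathlib
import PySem

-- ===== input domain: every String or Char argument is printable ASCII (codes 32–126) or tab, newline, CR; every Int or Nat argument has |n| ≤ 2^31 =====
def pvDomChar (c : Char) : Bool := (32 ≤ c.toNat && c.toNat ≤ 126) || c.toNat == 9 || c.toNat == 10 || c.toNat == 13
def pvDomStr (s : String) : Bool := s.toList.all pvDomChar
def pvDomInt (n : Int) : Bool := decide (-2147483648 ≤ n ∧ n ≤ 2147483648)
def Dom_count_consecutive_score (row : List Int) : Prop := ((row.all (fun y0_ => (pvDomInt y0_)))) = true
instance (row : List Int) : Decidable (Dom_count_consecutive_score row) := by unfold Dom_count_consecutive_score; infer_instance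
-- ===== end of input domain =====

-- B replaces A's per-element running counters with a two-pointer sweep over maximal runs
-- keeping only the two run-length maxima (objective: alternative decomposition, same cost).


-- ===== PORT A =====
-- the loop body of A: state is (max_count_1, count_1, max_count_2, count_2)
def pvStepA (st : Int × Int × Int × Int) (r : Int) : Int × Int × Int × Int :=
  let (mc1, c1, mc2, c2) := st
  if r = 1 then (max mc1 (c1 + 1), c1 + 1, mc2, 0)
  else if r = 2 then (mc1, 0, max mc2 (c2 + 1), c2 + 1)
  else (mc1, 0, mc2, 0)

def pvScoring : PySem.Dict Int Int := PySem.Dict.ofList [(0, 0), (1, 0), (2, 10), (3, 40)]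

-- scoring[k] raises KeyError for k > 3; Pre_ excludes those rows, so getD's default is never used on Pre_
def count_consecutive_score (row : List Int) : Int × Int :=
  let s := row.foldl pvStepA (0, 0, 0, 0)
  (PySem.Dict.getD pvScoring s.1 0, -(PySem.Dict.getD pvScoring s.2.2.1 0))

-- ===== PORT B =====
-- the inner while of B: length of the maximal prefix of xs equal to x, and the rest
def pvSpan (x : Int) : List Int → Nat × List Int
  | [] => (0, [])
  | y :: ys =>
    if y = x then
      let (n, rest) := pvSpan x ys
      (n + 1, rest)
    else (0, y :: ys)

-- the outer while of B: consume one maximal run per step, updating the two maxima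
def pvRunsMax : List Int → Int → Int → Int × Int
  | [], m1, m2 => (m1, m2)
  | x :: xs, m1, m2 =>
    let p := pvSpan x xs
    let len : Int := (p.1 : Int) + 1
    if x = 1 then pvRunsMax p.2 (max m1 len) m2
    else if x = 2 then pvRunsMax p.2 m1 (max m2 len)
    else pvRunsMax p.2 m1 m2
termination_by l => l.length
decreasing_by
  all_goals
    have h : (pvSpan x xs).2.length ≤ xs.length := by
      induction xs with
      | nil => simp [pvSpan]
      | cons y ys ih =>
        by_cases hy : y = x <;> simp [pvSpan, hy] <;> omega
    simp only [List.length_cons]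
    omega

def count_consecutive_score_alt (row : List Int) : Int × Int :=
  let m := pvRunsMax row 0 0
  (PySem.Dict.getD pvScoring m.1 0, -(PySem.Dict.getD pvScoring m.2 0))

-- ===== PRECONDITION & SPEC =====
-- Pre_ excludes exactly the rows containing four consecutive 1s or four consecutive 2s,
-- on which the Python A (and B alike) raises KeyError at scoring[max_count].
def Pre_count_consecutive_score (row : List Int) : Prop :=
  ¬ [1, 1, 1, 1] <:+: row ∧ ¬ [2, 2, 2, 2] <:+: row
instance (row : List Int) : Decidable (Pre_count_consecutive_score row) := by
  unfold Pre_count_consecutive_score; infer_instance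
def pvWitness_count_consecutive_score : List Int := [1, 2, 2, 0, 1, 1, 3]

def Spec_count_consecutive_score (row : List Int) (out : Int × Int) : Prop := out = count_consecutive_score_alt row
instance (row : List Int) (out : Int × Int) : Decidable (Spec_count_consecutive_score row out) := by unfold Spec_count_consecutive_score; infer_instance

-- ===== CLAIM (what is proved, stated in full; the proofs are below) =====
def Claim_equal_count_consecutive_score : Prop := ∀ (row : List Int), Dom_count_consecutive_score row → Pre_count_consecutive_score row → Spec_count_consecutive_score row (count_consecutive_score row)

-- ===== LEMMAS AND PROOFS =====

theorem pvSpan_decomp (x : Int) (xs : List Int) :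
    xs = List.replicate (pvSpan x xs).1 x ++ (pvSpan x xs).2 ∧
      ∀ h ∈ (pvSpan x xs).2.head?, h ≠ x := by
  induction xs with
  | nil => simp [pvSpan]
  | cons y ys ih =>
    by_cases hy : y = x
    · subst hy
      simp only [pvSpan, if_pos]
      refine ⟨?_, ?_⟩
      · conv_lhs => rw [ih.1]
        simp [List.replicate_succ]
      · exact ih.2
    · simp [pvSpan, hy]

-- only the (max1, max2) components of A's state matter for the result
def pvProj (st : Int × Int × Int × Int) : Int × Int := (st.1, st.2.2.1)

theorem pvStepA_one (m1 c1 m2 c2 : Int) :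
    pvStepA (m1, c1, m2, c2) 1 = (max m1 (c1 + 1), c1 + 1, m2, 0) := by
  simp [pvStepA]

theorem pvStepA_two (m1 c1 m2 c2 : Int) :
    pvStepA (m1, c1, m2, c2) 2 = (m1, 0, max m2 (c2 + 1), c2 + 1) := by
  norm_num [pvStepA]

theorem pvStepA_other (x m1 c1 m2 c2 : Int) (hx1 : x ≠ 1) (hx2 : x ≠ 2) :
    pvStepA (m1, c1, m2, c2) x = (m1, 0, m2, 0) := by
  simp [pvStepA, hx1, hx2]

theorem pvFoldA_replicate_one (n : ℕ) (m1 c1 m2 c2 : Int) :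
    (List.replicate (n + 1) (1 : Int)).foldl pvStepA (m1, c1, m2, c2) =
      (max m1 (c1 + (n + 1 : Nat)), c1 + (n + 1 : Nat), m2, 0) := by
  induction n generalizing m1 c1 c2 with
  | zero => simp [pvStepA_one]
  | succ k ih =>
    rw [List.replicate_succ, List.foldl_cons, pvStepA_one, ih]
    refine Prod.ext ?_ (Prod.ext ?_ rfl) <;> (simp; omega)

theorem pvFoldA_replicate_two (n : ℕ) (m1 c1 m2 c2 : Int) :
    (List.replicate (n + 1) (2 : Int)).foldl pvStepA (m1, c1, m2, c2) =
      (m1, 0, max m2 (c2 + (n + 1 : Nat)), c2 + (n + 1 : Nat)) := by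
  induction n generalizing m2 c1 c2 with
  | zero => simp [pvStepA_two]
  | succ k ih =>
    rw [List.replicate_succ, List.foldl_cons, pvStepA_two, ih]
    refine Prod.ext rfl (Prod.ext rfl (Prod.ext ?_ ?_)) <;> (simp; omega)

theorem pvFoldA_replicate_other (n : ℕ) (x m1 c1 m2 c2 : Int) (hx1 : x ≠ 1) (hx2 : x ≠ 2) :
    (List.replicate (n + 1) x).foldl pvStepA (m1, c1, m2, c2) = (m1, 0, m2, 0) := by
  induction n generalizing c1 c2 with
  | zero => simp [pvStepA_other _ _ _ _ _ hx1 hx2]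
  | succ k ih =>
    rw [List.replicate_succ, List.foldl_cons, pvStepA_other _ _ _ _ _ hx1 hx2]
    exact ih 0 0

-- a leftover count_1 is irrelevant if the next element is not 1 (and count_2 is 0)
theorem pvProj_reset_one (l : List Int) (m1 c1 m2 : Int)
    (h : ∀ a ∈ l.head?, a ≠ (1 : Int)) :
    pvProj (l.foldl pvStepA (m1, c1, m2, 0)) = pvProj (l.foldl pvStepA (m1, 0, m2, 0)) := by
  cases l with
  | nil => rfl
  | cons a l' =>
    have ha : a ≠ 1 := h a (by simp)
    by_cases h2 : a = 2
    · subst h2; rw [List.foldl_cons, List.foldl_cons, pvStepA_two, pvStepA_two]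
    · rw [List.foldl_cons, List.foldl_cons, pvStepA_other _ _ _ _ _ ha h2,
        pvStepA_other _ _ _ _ _ ha h2]

theorem pvProj_reset_two (l : List Int) (m1 m2 c2 : Int)
    (h : ∀ a ∈ l.head?, a ≠ (2 : Int)) :
    pvProj (l.foldl pvStepA (m1, 0, m2, c2)) = pvProj (l.foldl pvStepA (m1, 0, m2, 0)) := by
  cases l with
  | nil => rfl
  | cons a l' =>
    have ha : a ≠ 2 := h a (by simp)
    by_cases h1 : a = 1
    · subst h1; rw [List.foldl_cons, List.foldl_cons, pvStepA_one, pvStepA_one]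
    · rw [List.foldl_cons, List.foldl_cons, pvStepA_other _ _ _ _ _ h1 ha,
        pvStepA_other _ _ _ _ _ h1 ha]

theorem pvMain (l : List Int) (m1 m2 : Int) :
    pvProj (l.foldl pvStepA (m1, 0, m2, 0)) = pvRunsMax l m1 m2 := by
  induction hn : l.length using Nat.strong_induction_on generalizing l m1 m2 with
  | _ n ih =>
    cases l with
    | nil => simp [pvRunsMax, pvProj]
    | cons x xs =>
      obtain ⟨hdec, hhd⟩ := pvSpan_decomp x xs
      have hlen : (pvSpan x xs).2.length ≤ xs.length := by
        conv_rhs => rw [hdec]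
        simp
      have hlt : (pvSpan x xs).2.length < n := by
        subst hn; simp only [List.length_cons]; omega
      have hrw : x :: xs = List.replicate ((pvSpan x xs).1 + 1) x ++ (pvSpan x xs).2 := by
        conv_lhs => rw [hdec]
        rw [← List.cons_append, ← List.replicate_succ]
      by_cases h1 : x = 1
      · subst h1
        conv_lhs => rw [hrw]
        rw [List.foldl_append, pvFoldA_replicate_one]
        rw [pvProj_reset_one _ _ _ _ hhd]
        rw [ih _ hlt _ _ _ rfl]
        conv_rhs => rw [pvRunsMax]
        simp
      · by_cases h2 : x = 2
        · subst h2
          conv_lhs => rw [hrw]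
          rw [List.foldl_append, pvFoldA_replicate_two]
          rw [pvProj_reset_two _ _ _ _ hhd]
          rw [ih _ hlt _ _ _ rfl]
          conv_rhs => rw [pvRunsMax]
          simp
        · conv_lhs => rw [hrw]
          rw [List.foldl_append, pvFoldA_replicate_other _ _ _ _ _ _ h1 h2]
          rw [ih _ hlt _ _ _ rfl]
          conv_rhs => rw [pvRunsMax]
          simp [h1, h2]

-- ===== VERDICT (by name: the statement is the Claim_ definition above) =====
theorem count_consecutive_score_spec : Claim_equal_count_consecutive_score := by
  intro row _ _
  unfold Spec_count_consecutive_score count_consecutive_score count_consecutive_score_alt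
  have h := pvMain row 0 0
  have h1 : (row.foldl pvStepA (0, 0, 0, 0)).1 = (pvRunsMax row 0 0).1 :=
    congrArg Prod.fst h
  have h2 : (row.foldl pvStepA (0, 0, 0, 0)).2.2.1 = (pvRunsMax row 0 0).2 :=
    congrArg Prod.snd h
  simp only [h1, h2]
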